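-- pv_equiv track=rewrite | github.com/Suphrana/CS0-JesseMoyer | Assignments/FallingApart/fallingapart.py | fallingapart
-- ===== SOURCE A (Python) =====
-- def fallingapart(pieces):
--     AliceTurn = True
--     sumAlice = 0
--     sumBob = 0
--     for piece in pieces:
--         if AliceTurn:
--             sumAlice += piece
--         else:
--             sumBob += piece
--
--         AliceTurn = not AliceTurn
--
--     return sumAlice, sumBob
-- ===== SOURCE B (Python) =====
-- def fallingapart(pieces):
--     sumAlice = sum(p for i, p in enumerate(pieces) if i % 2 == 0)
--     sumBob = sum(p for i, p in enumerate(pieces) if i % 2 == 1)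
--     return sumAlice, sumBob
-- ===== Notes on version B (the rewrite author's own statement) =====
-- stated objective: idiomatic
-- what changed: Replaces the toggle boolean and if/else accumulation with two enumerate-based comprehension sums selecting even and odd positions by index parity.
import Mathlib
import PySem

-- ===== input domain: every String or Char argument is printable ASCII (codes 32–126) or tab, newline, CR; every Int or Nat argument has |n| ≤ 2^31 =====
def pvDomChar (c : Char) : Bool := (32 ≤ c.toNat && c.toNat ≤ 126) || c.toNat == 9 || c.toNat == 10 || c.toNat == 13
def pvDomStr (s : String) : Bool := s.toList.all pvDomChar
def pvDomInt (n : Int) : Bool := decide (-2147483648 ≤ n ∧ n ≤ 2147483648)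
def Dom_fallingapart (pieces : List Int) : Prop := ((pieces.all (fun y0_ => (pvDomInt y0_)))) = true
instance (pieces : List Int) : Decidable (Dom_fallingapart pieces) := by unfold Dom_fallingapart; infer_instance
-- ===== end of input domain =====

-- B replaces A's toggle boolean and if/else branch by two enumerate-based parity-filtered sums (idiomatic; same cost).


-- ===== PORT A =====
def fallingapart (pieces : List Int) : Int × Int :=
  let st := pieces.foldl
    (fun (s : Bool × Int × Int) piece =>
      let s' := if s.1 then (s.1, s.2.1 + piece, s.2.2) else (s.1, s.2.1, s.2.2 + piece)
      (!s'.1, s'.2))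
    (true, 0, 0)
  (st.2.1, st.2.2)

-- ===== PORT B =====
def fallingapart_alt (pieces : List Int) : Int × Int :=
  let sumAlice := ((PySem.List.enumerate pieces).filter
    (fun p => PySem.Int.mod p.1 2 == 0)).foldl (fun s p => s + p.2) 0
  let sumBob := ((PySem.List.enumerate pieces).filter
    (fun p => PySem.Int.mod p.1 2 == 1)).foldl (fun s p => s + p.2) 0
  (sumAlice, sumBob)

-- ===== PRECONDITION & SPEC =====
def Spec_fallingapart (pieces : List Int) (out : Int × Int) : Prop := out = fallingapart_alt pieces
instance (pieces : List Int) (out : Int × Int) : Decidable (Spec_fallingapart pieces out) := by unfold Spec_fallingapart; infer_instance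

-- ===== CLAIM (what is proved, stated in full; the proofs are below) =====
def Claim_equal_fallingapart : Prop := ∀ (pieces : List Int), Dom_fallingapart pieces → Spec_fallingapart pieces (fallingapart pieces)

-- ===== LEMMAS AND PROOFS =====

/-- Reference spec: (sum at even positions, sum at odd positions). -/
def pvSplit : List Int → Int × Int
  | [] => (0, 0)
  | x :: r => (x + (pvSplit r).2, (pvSplit r).1)

lemma loopA_char (xs : List Int) : ∀ (a b : Int),
    (xs.foldl
      (fun (s : Bool × Int × Int) piece =>
        let s' := if s.1 then (s.1, s.2.1 + piece, s.2.2) else (s.1, s.2.1, s.2.2 + piece)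
        (!s'.1, s'.2))
      (true, a, b)).2 = (a + (pvSplit xs).1, b + (pvSplit xs).2) ∧
    (xs.foldl
      (fun (s : Bool × Int × Int) piece =>
        let s' := if s.1 then (s.1, s.2.1 + piece, s.2.2) else (s.1, s.2.1, s.2.2 + piece)
        (!s'.1, s'.2))
      (false, a, b)).2 = (a + (pvSplit xs).2, b + (pvSplit xs).1) := by
  induction xs with
  | nil => intro a b; simp [pvSplit]
  | cons x r ih =>
    intro a b
    constructor
    · simpa [pvSplit, List.foldl, add_assoc, add_comm, add_left_comm] using (ih (a + x) b).2
    · simpa [pvSplit, List.foldl, add_assoc, add_comm, add_left_comm] using (ih a (b + x)).1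

lemma mod_two_eq (n : Int) : PySem.Int.mod n 2 = n % 2 := by
  simp [PySem.Int.mod, Int.fmod_eq_emod]

lemma loopB_char (xs : List Int) : ∀ (n : Int) (c : Int),
    (((PySem.List.enumerate xs n).filter (fun p => p.1 % 2 == 0)).foldl
        (fun s p => s + p.2) c
      = c + (if n % 2 = 0 then (pvSplit xs).1 else (pvSplit xs).2)) ∧
    (((PySem.List.enumerate xs n).filter (fun p => p.1 % 2 == 1)).foldl
        (fun s p => s + p.2) c
      = c + (if n % 2 = 0 then (pvSplit xs).2 else (pvSplit xs).1)) := by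
  induction xs with
  | nil => intro n c; simp [PySem.List.enumerate, pvSplit]
  | cons x r ih =>
    intro n c
    by_cases h : n % 2 = 0
    · have h1 : ¬ (n % 2 = 1) := by omega
      have h2 : ¬ ((n + 1) % 2 = 0) := by omega
      constructor
      · simp only [PySem.List.enumerate_cons, List.filter_cons]
        simp [h, pvSplit, (ih (n + 1) (c + x)).1, h2, add_assoc]
      · simp only [PySem.List.enumerate_cons, List.filter_cons]
        simp [h, pvSplit, (ih (n + 1) c).2, h2]
    · have h1 : n % 2 = 1 := by omega
      have h2 : (n + 1) % 2 = 0 := by omega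
      constructor
      · simp only [PySem.List.enumerate_cons, List.filter_cons]
        simp [h1, pvSplit, (ih (n + 1) c).1, h2]
      · simp only [PySem.List.enumerate_cons, List.filter_cons]
        simp [h1, pvSplit, (ih (n + 1) (c + x)).2, h2, add_assoc]

-- ===== VERDICT (by name: the statement is the Claim_ definition above) =====
theorem fallingapart_spec : Claim_equal_fallingapart := by
  intro pieces _
  unfold Spec_fallingapart fallingapart fallingapart_alt
  have hA := (loopA_char pieces 0 0).1
  have hB := loopB_char pieces 0 0
  simp only [mod_two_eq, hA]
  simp [hB.1, hB.2]
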